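-- pv_equiv track=rewrite | github.com/thet0rt/algorithms | alg_course/lesson_2.py | findNextNonSkip
-- ===== SOURCE A (Python) =====
-- def findNextNonSkip(s: str, i: int) -> int:
--     skipCount = 0
--     while i >= 0 and (skipCount > 0 or s[i] == '#'):
--         if s[i] == '#':
--             skipCount += 1
--             i -= 1
--             continue
--         skipCount -= 1
--         i -= 1
--     return i
-- ===== SOURCE B (Python) =====
-- def findNextNonSkip(s: str, i: int) -> int:
--     if i < 0:
--         return i
--     stack = []
--     for j in range(i + 1):
--         if s[j] == '#':
--             if stack:
--                 stack.pop()
--         else: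
--             stack.append(j)
--     return stack[-1] if stack else -1
-- ===== Notes on version B (the rewrite author's own statement) =====
-- stated objective: alternative
-- what changed: Replaces the backward skip-counter scan with a single forward pass over the prefix s[0..i] that maintains an explicit stack of surviving indices (classic backspace simulation) and returns the top of the stack.
import Mathlib
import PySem

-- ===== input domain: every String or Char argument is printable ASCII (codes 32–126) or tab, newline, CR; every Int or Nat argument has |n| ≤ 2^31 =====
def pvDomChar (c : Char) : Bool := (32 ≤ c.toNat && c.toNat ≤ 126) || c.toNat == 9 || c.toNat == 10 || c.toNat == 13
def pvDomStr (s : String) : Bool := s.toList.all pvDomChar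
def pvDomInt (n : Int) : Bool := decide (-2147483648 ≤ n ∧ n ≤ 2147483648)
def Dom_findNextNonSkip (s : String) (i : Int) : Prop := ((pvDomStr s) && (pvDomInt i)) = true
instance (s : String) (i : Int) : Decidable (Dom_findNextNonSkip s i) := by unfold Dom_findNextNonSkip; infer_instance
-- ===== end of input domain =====

-- B replaces A's backward skip-counter scan by a forward stack of surviving indices; alternative, same cost.

-- ===== PORT A =====
-- the while loop of A, with state (skipCount, i)
def pvLoopA (s : String) (skip : Int) (i : Int) : Int :=
  if _hi : 0 ≤ i then
    match PySem.Str.pyGet? s i with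
    | none => i  -- Python raises IndexError here; excluded by Pre_
    | some c =>
      if skip > 0 ∨ c = '#' then
        if c = '#' then pvLoopA s (skip + 1) (i - 1)
        else pvLoopA s (skip - 1) (i - 1)
      else i
  else i
termination_by (i + 1).toNat
decreasing_by all_goals omega

def findNextNonSkip (s : String) (i : Int) : Int := pvLoopA s 0 i

-- ===== PORT B =====
-- one step of B's forward loop; the stack's HEAD models the END of the Python list (its top)
def pvStep (s : String) (stack : List Int) (j : Int) : List Int :=
  if PySem.Str.pyGet? s j = some '#' then stack.tail else j :: stack

-- 'stack' after B's 'for j in range(n)' loop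
def pvStack (s : String) (n : Int) : List Int :=
  (PySem.List.pyRange 0 n 1).foldl (pvStep s) []

def findNextNonSkip_alt (s : String) (i : Int) : Int :=
  if i < 0 then i
  else (pvStack s (i + 1)).headD (-1)  -- stack[-1] if stack else -1

-- ===== PRECONDITION & SPEC =====
-- Pre_ excludes i ≥ len(s) with i ≥ 0, where A raises IndexError on s[i].
def Pre_findNextNonSkip (s : String) (i : Int) : Prop := i < (s.toList.length : Int)
instance (s : String) (i : Int) : Decidable (Pre_findNextNonSkip s i) := by
  unfold Pre_findNextNonSkip; infer_instance

def pvWitness_findNextNonSkip : String × Int := ("ab#c", 3)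

def Spec_findNextNonSkip (s : String) (i : Int) (out : Int) : Prop := out = findNextNonSkip_alt s i
instance (s : String) (i : Int) (out : Int) : Decidable (Spec_findNextNonSkip s i out) := by unfold Spec_findNextNonSkip; infer_instance

-- ===== CLAIM (what is proved, stated in full; the proofs are below) =====
def Claim_equal_findNextNonSkip : Prop := ∀ (s : String) (i : Int), Dom_findNextNonSkip s i → Pre_findNextNonSkip s i → Spec_findNextNonSkip s i (findNextNonSkip s i)

-- ===== LEMMAS AND PROOFS =====

lemma pvStack_succ (s : String) (n : Nat) :
    pvStack s ((n : Int) + 1) = pvStep s (pvStack s n) n := by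
  unfold pvStack
  rw [PySem.List.pyRange_one_succ_right (by omega : (0:Int) ≤ n), List.foldl_append]
  simp

-- invariant: A's backward loop from index n-1 with skip pending pops returns the
-- (skip+1)-th element from the top of B's stack for the prefix of length n (or -1)
lemma pvLoopA_eq_stack (s : String) : ∀ (n : Nat), n ≤ s.toList.length → ∀ (skip : Nat),
    pvLoopA s (skip : Int) ((n : Int) - 1) = ((pvStack s n).drop skip).headD (-1) := by
  intro n
  induction n with
  | zero =>
    intro _ skip
    rw [pvLoopA]
    simp [pvStack, PySem.List.pyRange]
  | succ n ih =>
    intro hn skip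
    have hlt : n < s.toList.length := by omega
    have hget : PySem.Str.pyGet? s ((n : Int)) = some (s.toList[n]) := by
      simp [List.getElem?_eq_getElem hlt]
    have harg : ((n : Int) + 1) - 1 = (n : Int) := by omega
    push_cast
    rw [harg, pvLoopA]
    rw [dif_pos (by omega : (0:Int) ≤ (n : Int)), hget]
    dsimp only
    have hstack : pvStack s ((n : Int) + 1) = pvStep s (pvStack s n) n := pvStack_succ s n
    by_cases hc : s.toList[n] = '#'
    · -- '#' : A skips one more; B pops the stack
      rw [if_pos (Or.inr hc), if_pos hc]
      have : ((skip : Int) + 1) = ((skip + 1 : Nat) : Int) := by push_cast; ring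
      rw [this, ih (by omega) (skip + 1), hstack]
      have hstep : pvStep s (pvStack s n) n = (pvStack s n).tail := by
        unfold pvStep; rw [hget]; simp [hc]
      rw [hstep, ← List.drop_one, List.drop_drop]
      simp [Nat.add_comm]
    · -- ordinary char: B pushes n
      have hstep : pvStep s (pvStack s n) n = (n : Int) :: pvStack s n := by
        unfold pvStep; rw [hget]; simp [hc]
      match skip with
      | 0 =>
        rw [if_neg (by simp [hc])]
        rw [hstack, hstep]
        simp
      | Nat.succ k =>
        rw [if_pos (Or.inl (by push_cast; omega)), if_neg hc]
        have : ((Nat.succ k : Nat) : Int) - 1 = (k : Int) := by push_cast; omega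
        rw [this, ih (by omega) k, hstack, hstep]
        simp

-- ===== VERDICT (by name: the statement is the Claim_ definition above) =====
theorem findNextNonSkip_spec : Claim_equal_findNextNonSkip := by
  intro s i _ hpre
  unfold Spec_findNextNonSkip findNextNonSkip findNextNonSkip_alt
  by_cases hneg : i < 0
  · rw [if_pos hneg, pvLoopA, dif_neg (by omega)]
  · rw [if_neg hneg]
    have h0 : (0 : Int) ≤ i := by omega
    obtain ⟨n, rfl⟩ : ∃ n : Nat, i = (n : Int) := ⟨i.toNat, by omega⟩
    have hn : n + 1 ≤ s.toList.length := by
      unfold Pre_findNextNonSkip at hpre; omega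
    have := pvLoopA_eq_stack s (n + 1) hn 0
    simpa using this
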